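-- pv_equiv track=rewrite | github.com/Wojti-7/logia | Inne/ulica.py | osiedla
-- ===== SOURCE A (Python) =====
-- def osiedla(d):
--     osiedla = []
--     biezace_osiedle = [d[0]]
--     for i in range(1, len(d), 1):
--         if (d[i] - d[i-1] <= 3):
--             biezace_osiedle = biezace_osiedle + [d[i]]
--         else:
--             osiedla = osiedla + [biezace_osiedle]
--             biezace_osiedle = [d[i]]
--     osiedla = osiedla + [biezace_osiedle]
--     # uliczka jest pętlą więc:
--     if (1 in osiedla[0]) or (2 in osiedla[0]) or (3 in osiedla[0]):
--         # osiedla[0] =  osiedla[len(osiedla)-1] + osiedla[0]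
--         # osiedla.pop(len(osiedla)-1)
--         osiedla[len(osiedla)-1] =  osiedla[len(osiedla)-1] + osiedla[0]
--         osiedla.pop(0)
--     return osiedla
-- ===== SOURCE B (Python) =====
-- def osiedla(d):
--     # Build the runs back-to-front: walk d reversed, prepending each number to the
--     # first run when it is near its head, else opening a new run in front.
--     groups = []
--     for x in reversed(d):
--         if groups and groups[0][0] - x <= 3:
--             groups[0] = [x] + groups[0]
--         else:
--             groups = [[x]] + groups
--     g0 = groups[0]
--     # the street is a loop: wrap-merge (identical tail to the obvious spec)
--     if 1 in g0 or 2 in g0 or 3 in g0: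
--         groups[-1] = groups[-1] + g0
--         groups.pop(0)
--     return groups
-- ===== Notes on version B (the rewrite author's own statement) =====
-- stated objective: alternative
-- what changed: A builds runs with a forward index loop over range(1,len(d)) carrying an accumulator-plus-current-run state; B builds the run list back-to-front by iterating over reversed(d) and prepending to (or opening) the front run, with the same wrap-merge tail.
import Mathlib
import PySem

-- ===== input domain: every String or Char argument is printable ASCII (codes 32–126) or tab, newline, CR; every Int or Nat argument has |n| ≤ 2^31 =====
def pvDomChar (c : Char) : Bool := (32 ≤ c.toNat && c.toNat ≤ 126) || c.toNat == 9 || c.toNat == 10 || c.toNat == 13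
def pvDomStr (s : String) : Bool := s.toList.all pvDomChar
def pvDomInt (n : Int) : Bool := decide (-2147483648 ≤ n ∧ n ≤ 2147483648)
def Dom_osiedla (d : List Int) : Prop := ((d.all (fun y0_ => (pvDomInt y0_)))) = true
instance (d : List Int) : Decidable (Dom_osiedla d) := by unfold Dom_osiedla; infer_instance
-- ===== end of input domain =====

-- B builds the run list back-to-front over reversed(d) instead of A's forward index loop; same wrap-merge tail (objective: alternative).

-- ===== PORT A =====
-- the body of A's 'for i in range(1, len(d), 1)' loop (state = (osiedla, biezace_osiedle));
-- the two adjacent lookups via pyGetD: exact here, since i ranges over 1..len(d)-1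
def stepIdxA (d : List Int) (st : List (List Int) × List Int) (i : Int) :
    List (List Int) × List Int :=
  if PySem.List.pyGetD d i 0 - PySem.List.pyGetD d (i - 1) 0 ≤ 3 then
    (st.1, st.2 ++ [PySem.List.pyGetD d i 0])
  else
    (st.1 ++ [st.2], [PySem.List.pyGetD d i 0])

-- osiedla[len(osiedla)-1] = osiedla[len(osiedla)-1] + osiedla[0]; osiedla.pop(0)
def wrapMerge (os : List (List Int)) (g0 : List Int) : List (List Int) :=
  let os2 := os.set (os.length - 1) (PySem.List.pyGetD os ((os.length : Int) - 1) [] ++ g0)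
  match PySem.List.pop? os2 0 with
  | some (_, r) => r
  | none => []   -- unreachable under Pre_ (os is nonempty)

def osiedla (d : List Int) : List (List Int) :=
  match PySem.List.pyGet? d 0 with
  | none => []   -- indexing the first element raises IndexError on the empty list; excluded by Pre_
  | some d0 =>
    let st := (PySem.List.pyRange 1 (d.length : Int) 1).foldl (stepIdxA d) ([], [d0])
    let os := st.1 ++ [st.2]
    let g0 := PySem.List.pyGetD os 0 []    -- the first run; os is nonempty
    if g0.contains 1 || g0.contains 2 || g0.contains 3 then wrapMerge os g0 else os

-- ===== PORT B =====
-- one step of B's 'for x in reversed(d)' loop, which only touches the FRONT of groups;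
-- the whole reversed-order loop is the right fold of this step over d
def bstep (x : Int) (groups : List (List Int)) : List (List Int) :=
  match groups with
  | [] => [[x]]
  | g :: rest => if g.headD 0 - x ≤ 3 then (x :: g) :: rest else [x] :: g :: rest

def osiedla_alt (d : List Int) : List (List Int) :=
  let groups := d.foldr bstep []
  match groups with
  | [] => []   -- indexing the first run raises IndexError on the empty list; excluded by Pre_
  | g0 :: _ =>
    if g0.contains 1 || g0.contains 2 || g0.contains 3 then
      -- groups[-1] = groups[-1] + g0; groups.pop(0)
      let gs2 := groups.set (groups.length - 1) (PySem.List.pyGetD groups (-1) [] ++ g0)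
      match PySem.List.pop? gs2 0 with
      | some (_, r) => r
      | none => []   -- unreachable: groups is nonempty
    else groups

-- ===== PRECONDITION & SPEC =====
-- A indexes the first element unconditionally (B the first run): both raise IndexError on the empty list.
def Pre_osiedla (d : List Int) : Prop := d ≠ []
instance (d : List Int) : Decidable (Pre_osiedla d) := by unfold Pre_osiedla; infer_instance
def pvWitness_osiedla : List Int := ([1, 2, 10])

def Spec_osiedla (d : List Int) (out : List (List Int)) : Prop := out = osiedla_alt d
instance (d : List Int) (out : List (List Int)) : Decidable (Spec_osiedla d out) := by unfold Spec_osiedla; infer_instance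

-- ===== CLAIM (what is proved, stated in full; the proofs are below) =====
def Claim_equal_osiedla : Prop := ∀ (d : List Int), Dom_osiedla d → Pre_osiedla d → Spec_osiedla d (osiedla d)

-- ===== LEMMAS AND PROOFS =====

-- A's loop step, re-expressed on the looked-up adjacent pair itself
def stepPair (st : List (List Int) × List Int) (p : Int × Int) :
    List (List Int) × List Int :=
  if p.2 - p.1 ≤ 3 then (st.1, st.2 ++ [p.2]) else (st.1 ++ [st.2], [p.2])

-- A's loop state assembled into the final run list, as front recursion
def runsGo (os : List (List Int)) (cur : List Int) (prev : Int) : List Int → List (List Int)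
  | [] => os ++ [cur]
  | x :: xs => if x - prev ≤ 3 then runsGo os (cur ++ [x]) x xs
               else runsGo (os ++ [cur]) [x] x xs

-- folding A's indexed step = folding the pair step over the looked-up pairs
theorem foldl_stepIdx_map (d : List Int) (l : List Int) (init : List (List Int) × List Int) :
    l.foldl (stepIdxA d) init
      = (l.map (fun i => (PySem.List.pyGetD d (i - 1) 0, PySem.List.pyGetD d i 0))).foldl
          stepPair init := by
  induction l generalizing init with
  | nil => rfl
  | cons x xs ih =>
    rw [List.foldl_cons, List.map_cons, List.foldl_cons, ih]
    rfl

-- the looked-up pairs of A's index range are exactly the adjacent pairs of d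
theorem map_pairs (d : List Int) :
    (PySem.List.pyRange 1 (d.length : Int) 1).map
      (fun i => (PySem.List.pyGetD d (i - 1) 0, PySem.List.pyGetD d i 0))
      = d.zip d.tail := by
  apply List.ext_getElem
  · simp only [List.length_map, PySem.List.length_pyRange_one, List.length_zip, List.length_tail]
    omega
  · intro k h1 h2
    have hk : k + 1 < d.length := by
      simp only [List.length_zip, List.length_tail] at h2; omega
    simp only [List.getElem_map, PySem.List.getElem_pyRange_one, List.getElem_zip]
    have e1 : (1 : Int) + (k : Int) - 1 = ((k : Nat) : Int) := by omega
    have e2 : (1 : Int) + (k : Int) = (((k + 1 : Nat)) : Int) := by omega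
    rw [e1, e2, PySem.List.pyGetD_natCast, PySem.List.pyGetD_natCast,
        List.getD_eq_getElem d 0 (by omega), List.getD_eq_getElem d 0 hk]
    simp [List.getElem_tail]

-- folding the pair step over the adjacent pairs and appending the open run computes runsGo
theorem zip_foldl_runsGo (xs : List Int) (prev : Int) (os : List (List Int)) (cur : List Int) :
    (((prev :: xs).zip xs).foldl stepPair (os, cur)).1
      ++ [(((prev :: xs).zip xs).foldl stepPair (os, cur)).2]
      = runsGo os cur prev xs := by
  induction xs generalizing prev os cur with
  | nil => simp [runsGo]
  | cons x xs' ih =>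
    simp only [List.zip_cons_cons, List.foldl_cons, runsGo, stepPair]
    by_cases hle : x - prev ≤ 3 <;> simp only [hle, if_true, if_false] <;> exact ih x _ _

-- B's foldr always yields a run list whose first run starts with the first element
theorem runsR_shape (x : Int) (xs : List Int) :
    ∃ t gs, (x :: xs).foldr bstep [] = (x :: t) :: gs := by
  induction xs generalizing x with
  | nil => exact ⟨[], [], rfl⟩
  | cons y ys ih =>
    obtain ⟨t, gs, h⟩ := ih y
    simp only [List.foldr_cons] at h ⊢
    rw [h]
    unfold bstep
    by_cases hle : y - x ≤ 3 <;> simp [hle]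

-- runsGo agrees with B's foldr grouping
theorem runsGo_eq_runsR (xs : List Int) (prev : Int) (os : List (List Int)) (cur : List Int)
    (t : List Int) (gs : List (List Int))
    (h : (prev :: xs).foldr bstep [] = (prev :: t) :: gs) :
    runsGo os cur prev xs = os ++ (cur ++ t) :: gs := by
  induction xs generalizing prev os cur t gs with
  | nil =>
    simp only [List.foldr_cons, List.foldr_nil, bstep] at h
    injection h with h1 h2
    injection h1 with _ h1'
    subst h2; rw [← h1']
    simp [runsGo]
  | cons x xs' ih =>
    obtain ⟨t', gs', hshape⟩ := runsR_shape x xs'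
    have hfold : (prev :: x :: xs').foldr bstep [] = bstep prev ((x :: xs').foldr bstep []) := by
      simp
    rw [hfold, hshape] at h
    unfold bstep at h
    simp only [List.headD_cons] at h
    by_cases hle : x - prev ≤ 3
    · rw [if_pos hle] at h
      injection h with h1 h2
      injection h1 with _ h1'
      subst h2
      rw [runsGo, if_pos hle, ih x os (cur ++ [x]) t' gs' hshape, ← h1']
      simp
    · rw [if_neg hle] at h
      injection h with h1 h2
      injection h1 with _ h1'
      subst h2
      rw [runsGo, if_neg hle, ih x (os ++ [cur]) [x] t' gs' hshape, ← h1']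
      simp

-- A's assembled run list is B's foldr grouping
theorem A_runs (d0 : Int) (rest : List Int) :
    (((PySem.List.pyRange 1 (((d0 :: rest).length : Int)) 1).foldl (stepIdxA (d0 :: rest)) ([], [d0])).1
      ++ [((PySem.List.pyRange 1 (((d0 :: rest).length : Int)) 1).foldl (stepIdxA (d0 :: rest)) ([], [d0])).2])
      = (d0 :: rest).foldr bstep [] := by
  obtain ⟨t, gs, hsh⟩ := runsR_shape d0 rest
  rw [foldl_stepIdx_map, map_pairs, List.tail_cons, zip_foldl_runsGo rest d0 [] [d0],
      runsGo_eq_runsR rest d0 [] [d0] t gs hsh, hsh]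
  simp

-- the two spellings of 'last element' agree on a nonempty list
theorem pyGetD_neg_one_eq_len_sub_one (os : List (List Int)) (h : os ≠ []) :
    PySem.List.pyGetD os (-1) [] = PySem.List.pyGetD os ((os.length : Int) - 1) [] := by
  have hlen : 0 < os.length := List.length_pos_of_ne_nil h
  have e : ((os.length : Int) - 1) = (((os.length - 1 : Nat)) : Int) := by omega
  rw [PySem.List.pyGetD_neg_one os [] h, e, PySem.List.pyGetD_natCast,
      List.getD_eq_getElem os [] (by omega)]
  simp [List.getLast_eq_getElem]

-- ===== VERDICT (by name: the statement is the Claim_ definition above) =====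
theorem osiedla_spec : Claim_equal_osiedla := by
  intro d _ hpre
  obtain ⟨d0, rest, rfl⟩ := List.exists_cons_of_ne_nil hpre
  have hget : PySem.List.pyGet? (d0 :: rest) 0 = some d0 := by
    simp [PySem.List.pyGet?, PySem.List.pyIdx?]
  obtain ⟨t, gs, hsh⟩ := runsR_shape d0 rest
  unfold Spec_osiedla osiedla osiedla_alt
  simp only [hget]
  rw [A_runs d0 rest, hsh]
  simp only [PySem.List.pyGetD_zero_cons]
  by_cases hc : ((d0 :: t).contains 1 || (d0 :: t).contains 2 || (d0 :: t).contains 3) = true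
  · rw [if_pos hc, if_pos hc]
    unfold wrapMerge
    rw [pyGetD_neg_one_eq_len_sub_one ((d0 :: t) :: gs) (by simp)]
  · rw [if_neg hc, if_neg hc]
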